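-- pv_equiv track=rewrite | github.com/tien190504/python | 8QuanHau/main.py | find_solutions_with_fixed_queen
-- ===== SOURCE A (Python) =====
-- def parse_position(position):
--     column = ord(position[0].upper()) - ord('A')  # Cột A-H sẽ tương ứng với 0-7
--     row = int(position[1]) - 1  # Hàng 1-8 sẽ tương ứng với 0-7
--     return row, column
--
-- def is_safe(board, row, col):
--     for i in range(row):
--         if board[i] == col or abs(board[i] - col) == abs(i - row):
--             return False
--     return True
--
-- def solve_n_queens(board, row, solutions):
--     if row == len(board):
--         solutions.append(board[:])
--         return
--
--     for col in range(len(board)):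
--         if is_safe(board, row, col):
--             board[row] = col
--             solve_n_queens(board, row + 1, solutions)
--             board[row] = -1  # Backtrack
--
-- def find_solutions_with_fixed_queen(fixed_position):
--     fixed_row, fixed_col = parse_position(fixed_position)
--
--     board = [-1] * 8  # Khởi tạo bàn cờ 8x8, mỗi hàng có -1 tức là chưa đặt quân hậu
--     board[fixed_row] = fixed_col  # Đặt quân hậu cố định
--
--     solutions = []
--     solve_n_queens(board, 0, solutions)
--
--     # Lọc ra những lời giải có quân hậu cố định tại vị trí mong muốn
--     valid_solutions = [sol for sol in solutions if sol[fixed_row] == fixed_col]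
--
--     return valid_solutions
-- ===== SOURCE B (Python) =====
-- def find_solutions_with_fixed_queen(fixed_position):
--     column = ord(fixed_position[0].upper()) - ord('A')
--     row = int(fixed_position[1]) - 1
--     if not (0 <= row < 8 and 0 <= column < 8):
--         return []
--
--     def safe(board, col):
--         r = len(board)
--         return all(c != col and abs(c - col) != r - i for i, c in enumerate(board))
--
--     def extend(board):
--         if len(board) == 8:
--             return [board]
--         cols = [column] if len(board) == row else range(8)
--         out = []
--         for col in cols:
--             if safe(board, col):
--                 out.extend(extend(board + [col]))
--         return out
--
--     return extend([])
-- ===== Notes on version B (the rewrite author's own statement) =====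
-- stated objective: alternative
-- what changed: A enumerates all 92 eight-queens solutions with a mutable full board (-1 sentinels, backtracking) and then filters by the fixed square; B validates the fixed square up front and runs a pruned recursive search on a growing partial board that forces the fixed column at the fixed row, with no post-filter.
-- intended difference: On inputs whose rank digit is 0 (row index -1) with file letter A-H, A's negative indexing silently treats the nonexistent row 0 as row 8 and returns the solutions with that queen on the last row, while B returns [], the intended answer since the requested row does not exist. — e.g. on find_solutions_with_fixed_queen("A0"): A returns [[2, 4, 1, 7, 5, 3, 6, 0], [2, 5, 3, 1, 7, 4, 6, 0], [3, 1, 6, 2, 5, 7, 4, 0], [4, 1, 3, 6, 2, 7, 5, 0]], B returns []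
-- crash fix: On strings of length >= 2 whose rank digit is 9 (row 8), A raises IndexError on board[8]; B returns []. — e.g. on find_solutions_with_fixed_queen("A9"): A raises IndexError, B returns []
import Mathlib
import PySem

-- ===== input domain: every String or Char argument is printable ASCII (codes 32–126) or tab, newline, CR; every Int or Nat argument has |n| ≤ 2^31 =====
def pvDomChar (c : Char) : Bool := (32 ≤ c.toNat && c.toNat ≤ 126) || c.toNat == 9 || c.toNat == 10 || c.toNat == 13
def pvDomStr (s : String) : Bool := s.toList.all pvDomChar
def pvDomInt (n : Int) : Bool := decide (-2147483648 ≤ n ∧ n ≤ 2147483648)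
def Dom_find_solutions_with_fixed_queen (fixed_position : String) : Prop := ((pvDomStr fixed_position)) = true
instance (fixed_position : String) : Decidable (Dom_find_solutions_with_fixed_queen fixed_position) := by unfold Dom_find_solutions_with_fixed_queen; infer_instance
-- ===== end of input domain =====

-- B replaces A's enumerate-all-92-solutions-then-filter search (full board with -1 sentinels,
-- mutate/backtrack, post-filter on the fixed square) by a pruned search on a growing partial board
-- that forces the fixed column at the fixed row; objective: faster (prunes the tree) / simpler.

-- ===== PORT A =====
-- parse_position: returns none where Python raises (IndexError on short input, ValueError from int())
def parse_position (position : String) : Option (Int × Int) :=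
  match PySem.Str.pyGet? position 0 with
  | none => none
  | some c0 =>
    let column : Int := ((PySem.Chars.upperChar c0).toNat : Int) - 65
    match PySem.Str.pyGet? position 1 with
    | none => none
    | some c1 =>
      match PySem.Int.ofChars? [c1] with
      | none => none
      | some v => some (v - 1, column)

def is_safe (board : List Int) (row : Nat) (col : Int) : Bool :=
  (List.range row).all (fun i =>
    !(board.getD i 0 == col || (board.getD i 0 - col).natAbs == ((i : Int) - (row : Int)).natAbs))

-- solve_n_queens, solutions threaded as the fold accumulator; fuel = recursion depth (≤ 9 here)
def solve_n_queens (fuel : Nat) (board : List Int) (row : Nat) : List (List Int) :=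
  match fuel with
  | 0 => []
  | fuel + 1 =>
    if row = board.length then [board]
    else
      (PySem.List.pyRange 0 (board.length : Int) 1).foldl
        (fun acc col =>
          if is_safe board row col then acc ++ solve_n_queens fuel (board.set row col) (row + 1)
          else acc)
        []

def find_solutions_with_fixed_queen (fixed_position : String) : List (List Int) :=
  match parse_position fixed_position with
  | none => []                                   -- parse_position raised (excluded by Pre_)
  | some (fixed_row, fixed_col) =>
    match PySem.List.pySet? (List.replicate 8 (-1 : Int)) fixed_row fixed_col with
    | none => []                                 -- board[fixed_row] = fixed_col raised IndexError (excluded by Pre_)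
    | some board =>
      let solutions := solve_n_queens 9 board 0
      -- sol[fixed_row]: always in range here (sol has length 8, the pySet? above succeeded), so pyGetD is exact
      solutions.filter (fun sol => PySem.List.pyGetD sol fixed_row 0 == fixed_col)

-- ===== PORT B =====
def safeB (board : List Int) (col : Int) : Bool :=
  (PySem.List.enumerate board 0).all (fun ic =>
    !(ic.2 == col) && !(((ic.2 - col).natAbs : Int) == (board.length : Int) - ic.1))

def extendB (fuel : Nat) (row column : Int) (board : List Int) : List (List Int) :=
  match fuel with
  | 0 => []
  | fuel + 1 =>
    if board.length = 8 then [board]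
    else
      (if (board.length : Int) = row then [column] else PySem.List.pyRange 0 8 1).foldl
        (fun out col => if safeB board col then out ++ extendB fuel row column (board ++ [col]) else out)
        []

def find_solutions_with_fixed_queen_alt (fixed_position : String) : List (List Int) :=
  match PySem.Str.pyGet? fixed_position 0 with
  | none => []
  | some c0 =>
    let column : Int := ((PySem.Chars.upperChar c0).toNat : Int) - 65
    match PySem.Str.pyGet? fixed_position 1 with
    | none => []
    | some c1 =>
      match PySem.Int.ofChars? [c1] with
      | none => []
      | some v =>
        let row : Int := v - 1
        if 0 ≤ row ∧ row < 8 ∧ 0 ≤ column ∧ column < 8 then extendB 9 row column [] else []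

-- ===== PRECONDITION & SPEC =====
-- Pre_ excludes exactly the inputs where A raises: strings shorter than 2 (IndexError), a second
-- character that is not a digit (ValueError from int), and rank digit 9 (row 8, IndexError on board[8]).
def Pre_find_solutions_with_fixed_queen (fixed_position : String) : Prop :=
  2 ≤ fixed_position.toList.length ∧
  fixed_position.toList.getD 1 'x' ∈ ['0', '1', '2', '3', '4', '5', '6', '7', '8']
instance (fixed_position : String) : Decidable (Pre_find_solutions_with_fixed_queen fixed_position) := by
  unfold Pre_find_solutions_with_fixed_queen; infer_instance

def pvWitness_find_solutions_with_fixed_queen : String := "D5"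

-- On inputs with rank digit 0 (row index -1) and file letter A–H, A's negative indexing silently
-- treats the nonexistent row 0 as row 8 and returns the solutions with that queen on the LAST row,
-- while B returns [] — the intended answer, since the requested row does not exist.
def D_find_solutions_with_fixed_queen (fixed_position : String) : Prop :=
  2 ≤ fixed_position.toList.length ∧
  fixed_position.toList.getD 1 'x' = '0' ∧
  65 ≤ (PySem.Chars.upperChar (fixed_position.toList.getD 0 'x')).toNat ∧
  (PySem.Chars.upperChar (fixed_position.toList.getD 0 'x')).toNat ≤ 72
instance (fixed_position : String) : Decidable (D_find_solutions_with_fixed_queen fixed_position) := by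
  unfold D_find_solutions_with_fixed_queen; infer_instance

def Spec_find_solutions_with_fixed_queen (fixed_position : String) (out : List (List Int)) : Prop :=
  ¬ D_find_solutions_with_fixed_queen fixed_position → out = find_solutions_with_fixed_queen_alt fixed_position
instance (fixed_position : String) (out : List (List Int)) : Decidable (Spec_find_solutions_with_fixed_queen fixed_position out) := by
  unfold Spec_find_solutions_with_fixed_queen; infer_instance

def pvDiffWitness_find_solutions_with_fixed_queen : String := "A0"
def pvDiffWitnessOut_find_solutions_with_fixed_queen : (List (List Int)) × (List (List Int)) :=
  ([[2, 4, 1, 7, 5, 3, 6, 0], [2, 5, 3, 1, 7, 4, 6, 0], [3, 1, 6, 2, 5, 7, 4, 0], [4, 1, 3, 6, 2, 7, 5, 0]], [])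

-- On strings of length ≥ 2 whose rank digit is 9 (row 8), A raises IndexError on board[8]; B returns [].
def Raises_find_solutions_with_fixed_queen (fixed_position : String) : Prop :=
  2 ≤ fixed_position.toList.length ∧ fixed_position.toList.getD 1 'x' = '9'
instance (fixed_position : String) : Decidable (Raises_find_solutions_with_fixed_queen fixed_position) := by
  unfold Raises_find_solutions_with_fixed_queen; infer_instance
def pvRaiseWitness_find_solutions_with_fixed_queen : String := "A9"
def pvRaiseWitnessOut_find_solutions_with_fixed_queen : List (List Int) := []

-- ===== CLAIM (what is proved, stated in full; the proofs are below) =====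
def Claim_unchanged_find_solutions_with_fixed_queen : Prop := ∀ (fixed_position : String), Dom_find_solutions_with_fixed_queen fixed_position → Pre_find_solutions_with_fixed_queen fixed_position → Spec_find_solutions_with_fixed_queen fixed_position (find_solutions_with_fixed_queen fixed_position)
def Claim_changed_find_solutions_with_fixed_queen : Prop := Dom_find_solutions_with_fixed_queen (pvDiffWitness_find_solutions_with_fixed_queen) ∧ Pre_find_solutions_with_fixed_queen (pvDiffWitness_find_solutions_with_fixed_queen) ∧ D_find_solutions_with_fixed_queen (pvDiffWitness_find_solutions_with_fixed_queen) ∧ find_solutions_with_fixed_queen (pvDiffWitness_find_solutions_with_fixed_queen) = pvDiffWitnessOut_find_solutions_with_fixed_queen.1 ∧ find_solutions_with_fixed_queen_alt (pvDiffWitness_find_solutions_with_fixed_queen) = pvDiffWitnessOut_find_solutions_with_fixed_queen.2 ∧ pvDiffWitnessOut_find_solutions_with_fixed_queen.1 ≠ pvDiffWitnessOut_find_solutions_with_fixed_queen.2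
def Claim_exact_find_solutions_with_fixed_queen : Prop := ∀ (fixed_position : String), Dom_find_solutions_with_fixed_queen fixed_position → Pre_find_solutions_with_fixed_queen fixed_position → D_find_solutions_with_fixed_queen fixed_position → find_solutions_with_fixed_queen fixed_position ≠ find_solutions_with_fixed_queen_alt fixed_position
def Claim_raises_find_solutions_with_fixed_queen : Prop := (∀ (fixed_position : String), Dom_find_solutions_with_fixed_queen fixed_position → Raises_find_solutions_with_fixed_queen fixed_position → ¬ Pre_find_solutions_with_fixed_queen fixed_position) ∧ (Dom_find_solutions_with_fixed_queen (pvRaiseWitness_find_solutions_with_fixed_queen) ∧ Raises_find_solutions_with_fixed_queen (pvRaiseWitness_find_solutions_with_fixed_queen) ∧ find_solutions_with_fixed_queen_alt (pvRaiseWitness_find_solutions_with_fixed_queen) = pvRaiseWitnessOut_find_solutions_with_fixed_queen)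


-- ===== LEMMAS AND PROOFS =====
theorem take_set_succ (b : List Int) (row : Nat) (v : Int) (h : row < b.length) :
    (b.set row v).take (row+1) = b.take row ++ [v] := by
  apply List.ext_getElem
  · simp; omega
  · intro i h1 h2
    simp only [List.getElem_take, List.getElem_set]
    rcases Nat.lt_or_ge i row with hi | hi
    · rw [List.getElem_append_left (by simp; omega)]
      simp [Nat.ne_of_gt hi, List.getElem_take]
    · have hir : i = row := by simp at h1; omega
      subst hir
      rw [List.getElem_append_right (by simp)]
      simp

theorem solve_succ (fuel : Nat) (b : List Int) (row : Nat) (h : ¬ row = b.length) :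
  solve_n_queens (fuel+1) b row = (PySem.List.pyRange 0 (b.length:Int) 1).flatMap
    (fun col => if is_safe b row col then solve_n_queens fuel (b.set row col) (row+1) else []) := by
  rw [solve_n_queens]
  simp only [h, if_false]
  rw [PySem.List.foldl_congr_mem (g := fun acc col => acc ++ (if is_safe b row col then solve_n_queens fuel (b.set row col) (row+1) else []))]
  · rw [PySem.List.foldl_append_eq_flatMap]; simp
  · intro acc x _; by_cases hs : is_safe b row x <;> simp [hs]

theorem extend_succ (fuel : Nat) (row column : Int) (board : List Int) (h : ¬ board.length = 8) :
  extendB (fuel+1) row column board =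
    (if (board.length : Int) = row then [column] else PySem.List.pyRange 0 8 1).flatMap
      (fun col => if safeB board col then extendB fuel row column (board ++ [col]) else []) := by
  rw [extendB]
  simp only [h, if_false]
  rw [PySem.List.foldl_congr_mem (g := fun out col => out ++ (if safeB board col then extendB fuel row column (board ++ [col]) else []))]
  · rw [PySem.List.foldl_append_eq_flatMap]; simp
  · intro acc x _; by_cases hs : safeB board x <;> simp [hs]

theorem solve_mem : ∀ (fuel : Nat) (b : List Int) (row : Nat) (sol : List Int),
    sol ∈ solve_n_queens fuel b row →
    sol.length = b.length ∧ (∀ i, i < row → sol.getD i 0 = b.getD i 0) ∧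
    (∀ i, row ≤ i → i < b.length → 0 ≤ sol.getD i 0 ∧ sol.getD i 0 < (b.length : Int)) := by
  intro fuel
  induction fuel with
  | zero => intro b row sol h; simp [solve_n_queens] at h
  | succ fuel ih =>
    intro b row sol h
    by_cases hrow : row = b.length
    · rw [solve_n_queens] at h
      simp only [hrow, if_true, List.mem_singleton] at h
      subst h
      exact ⟨rfl, fun i _ => rfl, fun i h1 h2 => absurd (hrow ▸ h2) (by omega)⟩
    · rw [solve_succ fuel b row hrow] at h
      simp only [List.mem_flatMap] at h
      rcases h with ⟨col, hcol, hsol⟩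
      by_cases hs : is_safe b row col
      · simp only [hs, if_true] at hsol
        rcases ih (b.set row col) (row+1) sol hsol with ⟨hlen, hpre, hrng⟩
        rw [List.length_set] at hlen
        have hcr : 0 ≤ col ∧ col < (b.length : Int) := by
          rw [PySem.List.mem_pyRange_one] at hcol; exact hcol
        refine ⟨hlen, ?_, ?_⟩
        · intro i hi
          rw [hpre i (by omega)]
          rw [List.getD, List.getD, List.getElem?_set_ne (by omega)]
        · intro i h1 h2
          rcases Nat.eq_or_lt_of_le h1 with he | hlt
          · have hr : row < b.length := by omega
            have := hpre row (by omega)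
            subst he
            rw [this, List.getD, List.getElem?_set_self (by omega)]
            simpa using hcr
          · have := hrng i hlt (by rw [List.length_set]; omega)
            rwa [List.length_set] at this
      · simp [hs] at hsol

theorem safe_eq {b p : List Int} (col : Int) (hle : p.length ≤ b.length)
    (hp : p = b.take p.length) : safeB p col = is_safe b p.length col := by
  rw [Bool.eq_iff_iff]
  simp only [safeB, is_safe, List.all_eq_true, PySem.List.mem_enumerate_iff, List.mem_range]
  constructor
  · intro h i hi
    have := h (((i:Int), p[i]'(by omega))) ⟨i, by omega, by simp⟩
    have hpi : p[i]'(by omega) = b.getD i 0 := by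
      have h1 := List.getElem_of_eq hp hi
      rw [h1, List.getElem_take]
      simp [List.getD, List.getElem?_eq_getElem (show i < b.length by omega)]
    simp only [hpi] at this
    simp only [Bool.and_eq_true, Bool.not_eq_true', beq_eq_false_iff_ne, ne_eq] at this
    simp only [Bool.not_eq_true', Bool.or_eq_false_iff, beq_eq_false_iff_ne, ne_eq]
    rcases this with ⟨h1, h2⟩
    refine ⟨h1, ?_⟩
    intro hc
    apply h2
    omega
  · intro h pr hpr
    rcases hpr with ⟨k, hk, rfl⟩
    have := h k hk
    have hpk : p[k]'hk = b.getD k 0 := by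
      have h1 := List.getElem_of_eq hp hk
      rw [h1, List.getElem_take]
      simp [List.getD, List.getElem?_eq_getElem (show k < b.length by omega)]
    simp only [Bool.not_eq_true', Bool.or_eq_false_iff, beq_eq_false_iff_ne, ne_eq] at this
    simp only [hpk, Bool.and_eq_true, Bool.not_eq_true', beq_eq_false_iff_ne, ne_eq]
    rcases this with ⟨h1, h2⟩
    refine ⟨h1, ?_⟩
    intro hc
    apply h2
    omega

theorem flatMap_eq_single {l : List Int} {fc : Int} (X : List (List Int))
    (hnd : l.Nodup) (hm : fc ∈ l) (f : Int → List (List Int))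
    (hf : ∀ c ∈ l, f c = if c = fc then X else []) : l.flatMap f = X := by
  induction l with
  | nil => simp at hm
  | cons a t ih =>
    rcases List.nodup_cons.mp hnd with ⟨ha, hnt⟩
    by_cases hafc : a = fc
    · subst hafc
      rw [List.flatMap_cons, hf a (by simp), if_pos rfl]
      have ht : t.flatMap f = [] := by
        rw [List.flatMap_eq_nil_iff]
        intro c hc
        rw [hf c (by simp [hc]), if_neg (by rintro rfl; exact ha hc)]
      simp [ht]
    · have hmt : fc ∈ t := by
        cases List.mem_cons.mp hm with
        | inl h => exact absurd h.symm hafc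
        | inr h => exact h
      rw [List.flatMap_cons, hf a (by simp), if_neg hafc]
      simpa using ih hnt hmt (fun c hc => hf c (List.mem_cons_of_mem _ hc))

theorem main_lemma : ∀ (fuel : Nat) (b p : List Int) (frn : Nat) (fc : Int),
    b.length = 8 → p.length ≤ 8 → p = b.take p.length → frn < 8 → 0 ≤ fc → fc < 8 →
    (frn < p.length → p.getD frn 0 = fc) →
    extendB fuel (frn : Int) fc p =
      (solve_n_queens fuel b p.length).filter (fun sol => PySem.List.pyGetD sol (frn : Int) 0 == fc) := by
  intro fuel
  induction fuel with
  | zero => intro b p frn fc _ _ _ _ _ _ _; simp [extendB, solve_n_queens]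
  | succ fuel ih =>
    intro b p frn fc hb hple hp hfrn hfc0 hfc8 hfix
    by_cases hp8 : p.length = 8
    · have hpb : p = b := by rw [hp, hp8, ← hb, List.take_length]
      have hbf : (b[frn]?.getD 0 == fc) = true := by
        have h2 := hfix (by omega)
        rw [hpb] at h2
        simpa [List.getD] using h2
      rw [extendB, solve_n_queens]
      simp only [hp8, hb, if_true]
      rw [hpb, List.filter_singleton]
      simp [hbf]
    · have hrow : ¬ p.length = b.length := by omega
      have hstep : ∀ col : Int, 0 ≤ col → col < 8 →
          (frn < p.length + 1 → (p ++ [col]).getD frn 0 = fc) →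
          extendB fuel (frn : Int) fc (p ++ [col]) =
            (solve_n_queens fuel (b.set p.length col) (p.length + 1)).filter
              (fun sol => PySem.List.pyGetD sol (frn : Int) 0 == fc) := by
        intro col hc0 hc8 hfx
        have hlen : (p ++ [col]).length = p.length + 1 := by simp
        have h1 : (b.set p.length col).length = 8 := by simp [hb]
        have h2 : (p ++ [col]).length ≤ 8 := by simp; omega
        have h3 : p ++ [col] = (b.set p.length col).take ((p ++ [col]).length) := by
          rw [hlen, take_set_succ b p.length col (by omega)]
          conv_lhs => rw [hp]
        have := ih (b.set p.length col) (p ++ [col]) frn fc h1 h2 h3 hfrn hfc0 hfc8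
          (by rw [hlen]; exact hfx)
        rwa [hlen] at this
      rw [extend_succ fuel (frn : Int) fc p hp8, solve_succ fuel b p.length hrow,
        List.filter_flatMap]
      simp only [hb, Nat.cast_ofNat]
      by_cases hfr : p.length = frn
      · rw [if_pos (by exact_mod_cast congrArg (Nat.cast (R := Int)) hfr)]
        rw [flatMap_eq_single
          (X := if is_safe b p.length fc then
              (solve_n_queens fuel (b.set p.length fc) (p.length + 1)).filter
                (fun sol => PySem.List.pyGetD sol (frn : Int) 0 == fc)
            else [])
          (PySem.List.nodup_pyRange_one 0 8) (PySem.List.mem_pyRange_one.mpr ⟨hfc0, hfc8⟩)]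
        · rw [List.flatMap_cons, List.flatMap_nil, List.append_nil,
            safe_eq fc (by omega) hp]
          by_cases hs : is_safe b p.length fc
          · simp only [hs, if_true]
            exact hstep fc hfc0 hfc8 (fun _ => by rw [← hfr]; simp [List.getD])
          · simp [hs]
        · intro c hc
          by_cases hcfc : c = fc
          · subst hcfc
            by_cases hs : is_safe b p.length c <;> simp [hs]
          · rw [if_neg hcfc]
            by_cases hs : is_safe b p.length c
            · rw [if_pos hs, List.filter_eq_nil_iff]
              intro sol hsol
              rcases solve_mem fuel (b.set p.length c) (p.length + 1) sol hsol with ⟨_, hpre, _⟩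
              have hv := hpre frn (by omega)
              rw [← hfr, List.getD, List.getD,
                List.getElem?_set_self (by rw [hb]; omega)] at hv
              simp only [Option.getD_some] at hv
              simp only [PySem.List.pyGetD_natCast, List.getD, ← hfr]
              rw [hv]
              simpa using hcfc
            · rw [if_neg hs]; simp
      · have hfri : ¬ ((p.length : Int) = (frn : Int)) := by exact_mod_cast hfr
        rw [if_neg hfri]
        apply List.flatMap_congr
        intro col hcol
        have hcr := PySem.List.mem_pyRange_one.mp hcol
        rw [safe_eq col (by omega) hp]
        by_cases hs : is_safe b p.length col
        · rw [if_pos hs, if_pos hs]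
          refine hstep col hcr.1 hcr.2 ?_
          intro hlt
          have hlt' : frn < p.length := by omega
          rw [List.getD, List.getElem?_append_left hlt', ← List.getD]
          exact hfix hlt'
        · rw [if_neg hs, if_neg hs]; simp

theorem filter_out_of_range (b : List Int) (fr : Int) (frn : Nat) (fc : Int)
    (hb : b.length = 8) (hfrn : frn < 8)
    (hpg : ∀ sol : List Int, sol.length = 8 → PySem.List.pyGetD sol fr 0 = sol.getD frn 0)
    (hfc : fc < 0 ∨ 8 ≤ fc) :
    (solve_n_queens 9 b 0).filter (fun sol => PySem.List.pyGetD sol fr 0 == fc) = [] := by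
  rw [List.filter_eq_nil_iff]
  intro sol hsol
  rcases solve_mem 9 b 0 sol hsol with ⟨hlen, _, hrng⟩
  have h8 : sol.length = 8 := by omega
  rcases hrng frn (by omega) (by omega) with ⟨h0, h1⟩
  rw [hb] at h1
  rw [hpg sol h8]
  simp only [beq_iff_eq]
  push_cast at h1
  omega

theorem entry_eq (s : String) (c0 c1 : Char) (rest : List Char) (frn : Nat)
    (hs : s.toList = c0 :: c1 :: rest) (hfr : frn < 8)
    (hof : PySem.Int.ofChars? [c1] = some ((frn : Int) + 1)) :
    find_solutions_with_fixed_queen s = find_solutions_with_fixed_queen_alt s := by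
  have hg0 : PySem.Str.pyGet? s 0 = some c0 := by
    simp [PySem.Str.pyGet?, hs, PySem.List.pyGet?_zero_cons]
  have hg1 : PySem.Str.pyGet? s 1 = some c1 := by
    rw [PySem.Str.pyGet?, hs]
    simp [pysem]
  have hrow : ((frn : Int) + 1 - 1) = (frn : Int) := by ring
  simp only [find_solutions_with_fixed_queen, parse_position,
    find_solutions_with_fixed_queen_alt, hg0, hg1, hof, hrow]
  set fc : Int := ((PySem.Chars.upperChar c0).toNat : Int) - 65 with hfc
  have hset : PySem.List.pySet? (List.replicate 8 (-1 : Int)) (frn : Int) fc =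
      some ((List.replicate 8 (-1 : Int)).set frn fc) := by
    exact PySem.List.pySet?_natCast _ _ _ (by simpa using hfr)
  rw [hset]
  have hblen : ((List.replicate 8 (-1 : Int)).set frn fc).length = 8 := by simp
  by_cases hcol : 0 ≤ fc ∧ fc < 8
  · rw [if_pos ⟨by positivity, by exact_mod_cast hfr, hcol.1, hcol.2⟩]
    have := main_lemma 9 ((List.replicate 8 (-1 : Int)).set frn fc) [] frn fc
      hblen (by simp) (by simp) hfr hcol.1 hcol.2 (by intro h; simp at h)
    simp only [List.length_nil] at this
    exact this.symm
  · rw [if_neg (by intro hcon; exact hcol ⟨hcon.2.2.1, hcon.2.2.2⟩)]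
    have hout : fc < 0 ∨ 8 ≤ fc := by
      by_cases h0 : 0 ≤ fc
      · right
        by_cases h8 : fc < 8
        · exact absurd ⟨h0, h8⟩ hcol
        · omega
      · left; omega
    exact filter_out_of_range _ _ frn fc hblen hfr
      (fun sol h8 => by rw [PySem.List.pyGetD_natCast]) hout


theorem getD_congr_take (b1 b2 : List Int) (row i : Nat) (ht : b1.take row = b2.take row)
    (hi : i < row) : b1.getD i 0 = b2.getD i 0 := by
  have h1 : b1[i]? = b2[i]? := by
    rw [← List.getElem?_take_of_lt (l := b1) (by omega : i < row), ht,
      List.getElem?_take_of_lt (by omega)]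
  simp [List.getD, h1]

theorem is_safe_congr (b1 b2 : List Int) (row : Nat) (col : Int)
    (ht : b1.take row = b2.take row) : is_safe b1 row col = is_safe b2 row col := by
  unfold is_safe
  rw [Bool.eq_iff_iff, List.all_eq_true, List.all_eq_true]
  constructor <;> intro h i hi <;> have hm := h i hi <;> rw [List.mem_range] at hi
  · rw [← getD_congr_take b1 b2 row i ht hi]; exact hm
  · rw [getD_congr_take b1 b2 row i ht hi]; exact hm

theorem solve_congr : ∀ (fuel : Nat) (b1 b2 : List Int) (row : Nat),
    b1.length = b2.length → b1.take row = b2.take row →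
    solve_n_queens fuel b1 row = solve_n_queens fuel b2 row := by
  intro fuel
  induction fuel with
  | zero => intro b1 b2 row _ _; rfl
  | succ fuel ih =>
    intro b1 b2 row hlen ht
    rcases Nat.lt_or_ge row b1.length with hlt | hge
    · rw [solve_succ fuel b1 row (by omega), solve_succ fuel b2 row (by omega), hlen]
      apply List.flatMap_congr
      intro col hcol
      rw [is_safe_congr b1 b2 row col ht]
      by_cases hs : is_safe b2 row col
      · rw [if_pos hs, if_pos hs,
          ih (b1.set row col) (b2.set row col) (row+1) (by simp [hlen])
            (by rw [take_set_succ b1 row col hlt, take_set_succ b2 row col (by omega), ht])]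
      · rw [if_neg hs, if_neg hs]
    · have hb : b1 = b2 := by
        rw [← List.take_of_length_le hge, ht, List.take_of_length_le (by omega)]
      rw [hb]

theorem reduce_zero (s : String) (c0 : Char) (rest : List Char)
    (hs : s.toList = c0 :: '0' :: rest) :
    find_solutions_with_fixed_queen s =
      (solve_n_queens 9 ((List.replicate 8 (-1 : Int)).set 7
          (((PySem.Chars.upperChar c0).toNat : Int) - 65)) 0).filter
        (fun sol => PySem.List.pyGetD sol (0 - 1) 0 == ((PySem.Chars.upperChar c0).toNat : Int) - 65) ∧
    find_solutions_with_fixed_queen_alt s = [] := by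
  have hg0 : PySem.Str.pyGet? s 0 = some c0 := by
    simp [PySem.Str.pyGet?, hs, PySem.List.pyGet?_zero_cons]
  have hg1 : PySem.Str.pyGet? s 1 = some '0' := by
    rw [PySem.Str.pyGet?, hs]
    simp [pysem]
  have hof : PySem.Int.ofChars? ['0'] = some 0 := by decide
  set fc : Int := ((PySem.Chars.upperChar c0).toNat : Int) - 65 with hfc
  have hset : PySem.List.pySet? (List.replicate 8 (-1 : Int)) (0 - 1) fc =
      some ((List.replicate 8 (-1 : Int)).set 7 fc) := by
    norm_num [PySem.List.pySet?, PySem.List.pyIdx?]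
  constructor
  · simp only [find_solutions_with_fixed_queen, parse_position, hg0, hg1, hof]
    rw [← hfc, hset]
  · simp only [find_solutions_with_fixed_queen_alt, hg0, hg1, hof]
    rw [if_neg (by intro hcon; have := hcon.1; norm_num at this)]

theorem mem_solve_step (fuel : Nat) (b : List Int) (row : Nat) (col : Int) (sol : List Int)
    (hrow : ¬ row = b.length) (hcol : col ∈ PySem.List.pyRange 0 (b.length:Int) 1)
    (hsafe : is_safe b row col = true)
    (h : sol ∈ solve_n_queens fuel (b.set row col) (row+1)) :
    sol ∈ solve_n_queens (fuel+1) b row := by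
  rw [solve_succ fuel b row hrow]
  exact List.mem_flatMap.mpr ⟨col, hcol, by rw [if_pos hsafe]; exact h⟩


theorem chain_c0 : ([2, 4, 1, 7, 5, 3, 6, 0] : List Int) ∈ solve_n_queens 9 (List.replicate 8 (-1:Int)) 0 := by
  apply mem_solve_step 8 _ 0 2 _ (by decide) (by decide) (by decide)
  apply mem_solve_step 7 _ 1 4 _ (by decide) (by decide) (by decide)
  apply mem_solve_step 6 _ 2 1 _ (by decide) (by decide) (by decide)
  apply mem_solve_step 5 _ 3 7 _ (by decide) (by decide) (by decide)
  apply mem_solve_step 4 _ 4 5 _ (by decide) (by decide) (by decide)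
  apply mem_solve_step 3 _ 5 3 _ (by decide) (by decide) (by decide)
  apply mem_solve_step 2 _ 6 6 _ (by decide) (by decide) (by decide)
  apply mem_solve_step 1 _ 7 0 _ (by decide) (by decide) (by decide)
  decide

theorem chain_c1 : ([2, 5, 3, 0, 7, 4, 6, 1] : List Int) ∈ solve_n_queens 9 (List.replicate 8 (-1:Int)) 0 := by
  apply mem_solve_step 8 _ 0 2 _ (by decide) (by decide) (by decide)
  apply mem_solve_step 7 _ 1 5 _ (by decide) (by decide) (by decide)
  apply mem_solve_step 6 _ 2 3 _ (by decide) (by decide) (by decide)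
  apply mem_solve_step 5 _ 3 0 _ (by decide) (by decide) (by decide)
  apply mem_solve_step 4 _ 4 7 _ (by decide) (by decide) (by decide)
  apply mem_solve_step 3 _ 5 4 _ (by decide) (by decide) (by decide)
  apply mem_solve_step 2 _ 6 6 _ (by decide) (by decide) (by decide)
  apply mem_solve_step 1 _ 7 1 _ (by decide) (by decide) (by decide)
  decide

theorem chain_c2 : ([0, 6, 3, 5, 7, 1, 4, 2] : List Int) ∈ solve_n_queens 9 (List.replicate 8 (-1:Int)) 0 := by
  apply mem_solve_step 8 _ 0 0 _ (by decide) (by decide) (by decide)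
  apply mem_solve_step 7 _ 1 6 _ (by decide) (by decide) (by decide)
  apply mem_solve_step 6 _ 2 3 _ (by decide) (by decide) (by decide)
  apply mem_solve_step 5 _ 3 5 _ (by decide) (by decide) (by decide)
  apply mem_solve_step 4 _ 4 7 _ (by decide) (by decide) (by decide)
  apply mem_solve_step 3 _ 5 1 _ (by decide) (by decide) (by decide)
  apply mem_solve_step 2 _ 6 4 _ (by decide) (by decide) (by decide)
  apply mem_solve_step 1 _ 7 2 _ (by decide) (by decide) (by decide)
  decide

theorem chain_c3 : ([0, 4, 7, 5, 2, 6, 1, 3] : List Int) ∈ solve_n_queens 9 (List.replicate 8 (-1:Int)) 0 := by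
  apply mem_solve_step 8 _ 0 0 _ (by decide) (by decide) (by decide)
  apply mem_solve_step 7 _ 1 4 _ (by decide) (by decide) (by decide)
  apply mem_solve_step 6 _ 2 7 _ (by decide) (by decide) (by decide)
  apply mem_solve_step 5 _ 3 5 _ (by decide) (by decide) (by decide)
  apply mem_solve_step 4 _ 4 2 _ (by decide) (by decide) (by decide)
  apply mem_solve_step 3 _ 5 6 _ (by decide) (by decide) (by decide)
  apply mem_solve_step 2 _ 6 1 _ (by decide) (by decide) (by decide)
  apply mem_solve_step 1 _ 7 3 _ (by decide) (by decide) (by decide)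
  decide

theorem chain_c4 : ([0, 5, 7, 2, 6, 3, 1, 4] : List Int) ∈ solve_n_queens 9 (List.replicate 8 (-1:Int)) 0 := by
  apply mem_solve_step 8 _ 0 0 _ (by decide) (by decide) (by decide)
  apply mem_solve_step 7 _ 1 5 _ (by decide) (by decide) (by decide)
  apply mem_solve_step 6 _ 2 7 _ (by decide) (by decide) (by decide)
  apply mem_solve_step 5 _ 3 2 _ (by decide) (by decide) (by decide)
  apply mem_solve_step 4 _ 4 6 _ (by decide) (by decide) (by decide)
  apply mem_solve_step 3 _ 5 3 _ (by decide) (by decide) (by decide)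
  apply mem_solve_step 2 _ 6 1 _ (by decide) (by decide) (by decide)
  apply mem_solve_step 1 _ 7 4 _ (by decide) (by decide) (by decide)
  decide

theorem chain_c5 : ([2, 0, 6, 4, 7, 1, 3, 5] : List Int) ∈ solve_n_queens 9 (List.replicate 8 (-1:Int)) 0 := by
  apply mem_solve_step 8 _ 0 2 _ (by decide) (by decide) (by decide)
  apply mem_solve_step 7 _ 1 0 _ (by decide) (by decide) (by decide)
  apply mem_solve_step 6 _ 2 6 _ (by decide) (by decide) (by decide)
  apply mem_solve_step 5 _ 3 4 _ (by decide) (by decide) (by decide)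
  apply mem_solve_step 4 _ 4 7 _ (by decide) (by decide) (by decide)
  apply mem_solve_step 3 _ 5 1 _ (by decide) (by decide) (by decide)
  apply mem_solve_step 2 _ 6 3 _ (by decide) (by decide) (by decide)
  apply mem_solve_step 1 _ 7 5 _ (by decide) (by decide) (by decide)
  decide

theorem chain_c6 : ([3, 1, 4, 7, 5, 0, 2, 6] : List Int) ∈ solve_n_queens 9 (List.replicate 8 (-1:Int)) 0 := by
  apply mem_solve_step 8 _ 0 3 _ (by decide) (by decide) (by decide)
  apply mem_solve_step 7 _ 1 1 _ (by decide) (by decide) (by decide)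
  apply mem_solve_step 6 _ 2 4 _ (by decide) (by decide) (by decide)
  apply mem_solve_step 5 _ 3 7 _ (by decide) (by decide) (by decide)
  apply mem_solve_step 4 _ 4 5 _ (by decide) (by decide) (by decide)
  apply mem_solve_step 3 _ 5 0 _ (by decide) (by decide) (by decide)
  apply mem_solve_step 2 _ 6 2 _ (by decide) (by decide) (by decide)
  apply mem_solve_step 1 _ 7 6 _ (by decide) (by decide) (by decide)
  decide

theorem chain_c7 : ([3, 6, 4, 1, 5, 0, 2, 7] : List Int) ∈ solve_n_queens 9 (List.replicate 8 (-1:Int)) 0 := by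
  apply mem_solve_step 8 _ 0 3 _ (by decide) (by decide) (by decide)
  apply mem_solve_step 7 _ 1 6 _ (by decide) (by decide) (by decide)
  apply mem_solve_step 6 _ 2 4 _ (by decide) (by decide) (by decide)
  apply mem_solve_step 5 _ 3 1 _ (by decide) (by decide) (by decide)
  apply mem_solve_step 4 _ 4 5 _ (by decide) (by decide) (by decide)
  apply mem_solve_step 3 _ 5 0 _ (by decide) (by decide) (by decide)
  apply mem_solve_step 2 _ 6 2 _ (by decide) (by decide) (by decide)
  apply mem_solve_step 1 _ 7 7 _ (by decide) (by decide) (by decide)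
  decide

theorem entry_zero (s : String) (c0 : Char) (rest : List Char)
    (hs : s.toList = c0 :: '0' :: rest)
    (hout : ((PySem.Chars.upperChar c0).toNat : Int) - 65 < 0 ∨
            8 ≤ ((PySem.Chars.upperChar c0).toNat : Int) - 65) :
    find_solutions_with_fixed_queen s = find_solutions_with_fixed_queen_alt s := by
  rcases reduce_zero s c0 rest hs with ⟨hA, hB⟩
  rw [hA, hB]
  exact filter_out_of_range _ _ 7 _ (by simp) (by omega)
    (fun sol h8 => by
      rw [PySem.List.pyGetD, show (0:Int) - 1 = -1 by norm_num,
        PySem.List.pyGet?_neg_one, List.getLast?_eq_getElem?, h8]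
      simp [List.getD]) hout


theorem find_solutions_with_fixed_queen_tight_aux :
    ∀ (s : String), Pre_find_solutions_with_fixed_queen s → D_find_solutions_with_fixed_queen s →
      find_solutions_with_fixed_queen s ≠ find_solutions_with_fixed_queen_alt s := by
  intro s hpre hD
  rcases hD with ⟨hlen, h0, h65, h72⟩
  rcases hl : s.toList with _ | ⟨c0, tl⟩
  · rw [hl] at hlen; simp at hlen
  rcases hl2 : tl with _ | ⟨c1, rest⟩
  · rw [hl, hl2] at hlen; simp at hlen
  rw [hl2] at hl
  rw [hl] at h0 h65 h72
  simp only [List.getD_cons_succ, List.getD_cons_zero] at h0 h65 h72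
  subst h0
  rcases reduce_zero s c0 rest hl with ⟨hA, hB⟩
  rw [hA, hB, solve_congr 9 _ (List.replicate 8 (-1:Int)) 0 (by simp) (by simp)]
  obtain ⟨u, hu⟩ : ∃ u, (PySem.Chars.upperChar c0).toNat = u := ⟨_, rfl⟩
  rw [hu] at h65 h72 ⊢
  interval_cases u
  · exact List.ne_nil_of_mem (List.mem_filter.mpr ⟨chain_c0, by decide⟩)
  · exact List.ne_nil_of_mem (List.mem_filter.mpr ⟨chain_c1, by decide⟩)
  · exact List.ne_nil_of_mem (List.mem_filter.mpr ⟨chain_c2, by decide⟩)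
  · exact List.ne_nil_of_mem (List.mem_filter.mpr ⟨chain_c3, by decide⟩)
  · exact List.ne_nil_of_mem (List.mem_filter.mpr ⟨chain_c4, by decide⟩)
  · exact List.ne_nil_of_mem (List.mem_filter.mpr ⟨chain_c5, by decide⟩)
  · exact List.ne_nil_of_mem (List.mem_filter.mpr ⟨chain_c6, by decide⟩)
  · exact List.ne_nil_of_mem (List.mem_filter.mpr ⟨chain_c7, by decide⟩)

-- ===== VERDICT (by name: the statements are the Claim_ definitions above) =====
theorem find_solutions_with_fixed_queen_spec :
    Claim_unchanged_find_solutions_with_fixed_queen := by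
  unfold Claim_unchanged_find_solutions_with_fixed_queen
  intro s _ hpre hD
  rcases hpre with ⟨hlen, hmem⟩
  rcases hl : s.toList with _ | ⟨c0, tl⟩
  · rw [hl] at hlen; simp at hlen
  rcases hl2 : tl with _ | ⟨c1, rest⟩
  · rw [hl, hl2] at hlen; simp at hlen
  rw [hl2] at hl
  rw [hl] at hmem
  simp only [List.getD_cons_succ, List.getD_cons_zero, List.mem_cons, List.not_mem_nil, or_false] at hmem
  rcases hmem with h|h|h|h|h|h|h|h|h
  · -- c1 = '0' : outside D_, so the file letter is not A–H
    subst h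
    have hcol : ¬ (65 ≤ (PySem.Chars.upperChar c0).toNat ∧ (PySem.Chars.upperChar c0).toNat ≤ 72) := by
      intro hc
      exact hD ⟨by rw [hl]; simp, by rw [hl]; simp, by rw [hl]; simpa using hc.1, by rw [hl]; simpa using hc.2⟩
    refine entry_zero s c0 rest hl ?_
    by_cases h65 : 65 ≤ (PySem.Chars.upperChar c0).toNat
    · right
      by_cases h72 : (PySem.Chars.upperChar c0).toNat ≤ 72
      · exact absurd ⟨h65, h72⟩ hcol
      · omega
    · left; omega
  · exact entry_eq s c0 c1 rest 0 hl (by omega) (by rw [h]; decide)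
  · exact entry_eq s c0 c1 rest 1 hl (by omega) (by rw [h]; decide)
  · exact entry_eq s c0 c1 rest 2 hl (by omega) (by rw [h]; decide)
  · exact entry_eq s c0 c1 rest 3 hl (by omega) (by rw [h]; decide)
  · exact entry_eq s c0 c1 rest 4 hl (by omega) (by rw [h]; decide)
  · exact entry_eq s c0 c1 rest 5 hl (by omega) (by rw [h]; decide)
  · exact entry_eq s c0 c1 rest 6 hl (by omega) (by rw [h]; decide)
  · exact entry_eq s c0 c1 rest 7 hl (by omega) (by rw [h]; decide)


set_option maxHeartbeats 4000000 in
theorem find_solutions_with_fixed_queen_changed : Claim_changed_find_solutions_with_fixed_queen := by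
  unfold Claim_changed_find_solutions_with_fixed_queen; decide

@[simp]
theorem find_solutions_with_fixed_queen_raises : Claim_raises_find_solutions_with_fixed_queen := by
  unfold Claim_raises_find_solutions_with_fixed_queen
  refine ⟨?_, by decide⟩
  intro s _ hr hp
  rcases hr with ⟨_, h9⟩
  rcases hp with ⟨_, hmem⟩
  rw [h9] at hmem
  simp at hmem

theorem find_solutions_with_fixed_queen_tight : Claim_exact_find_solutions_with_fixed_queen := by
  unfold Claim_exact_find_solutions_with_fixed_queen
  intro s _
  exact find_solutions_with_fixed_queen_tight_aux s
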